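-- pv_equiv track=rewrite | github.com/blackholebug/TM_final_NER | add_features/Gazateer.py | get_gazateer
-- ===== SOURCE A (Python) =====
-- myDictionary = {}
--
-- def get_gazateer(words):
--     result=["NULL" for i in range(len(words))]
--     i = 0
--     while(i < len(words)):
--         # reverse the list
--         for j in range(i,len(words))[::-1]:
--             plat_str = " ".join(words[i:j+1]).lower()
--             if(plat_str in myDictionary):
--                 for k in range(i,j+1):
--                     # result[k] = "Gazetteer"
--                     if(k==i):
--                         result[k] = "B-"+myDictionary[plat_str]
--                     else:
--                         result[k] = "I-"+myDictionary[plat_str]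
--                 i = j
--                 break
--         i+=1
--     return result
-- ===== SOURCE B (Python) =====
-- myDictionary = {}
--
-- def get_gazateer(words):
--     # The module-level gazetteer dictionary is empty, so no phrase can ever
--     # match: every word is tagged "NULL".
--     return ["NULL"] * len(words)
-- ===== Notes on version B (the rewrite author's own statement) =====
-- stated objective: simpler
-- what changed: A scans all spans i..j against the module-level gazetteer dictionary, but that dictionary is the empty literal, so no span ever matches; B drops the whole scan and directly returns the constant list that tags every word NULL.
import Mathlib
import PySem

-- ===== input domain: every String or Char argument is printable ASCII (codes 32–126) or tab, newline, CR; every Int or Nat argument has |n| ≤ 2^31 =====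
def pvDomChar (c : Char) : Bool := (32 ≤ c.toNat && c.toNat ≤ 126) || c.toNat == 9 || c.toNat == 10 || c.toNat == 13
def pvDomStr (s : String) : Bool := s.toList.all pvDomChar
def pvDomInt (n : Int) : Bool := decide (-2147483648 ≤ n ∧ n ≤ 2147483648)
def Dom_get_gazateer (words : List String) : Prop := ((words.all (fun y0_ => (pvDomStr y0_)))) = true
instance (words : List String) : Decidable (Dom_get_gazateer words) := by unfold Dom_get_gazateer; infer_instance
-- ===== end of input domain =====

-- B replaces A's O(n^3) span scan over an EMPTY module-level gazetteer dictionary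
-- by the constant list (every word tagged NULL) it always produces (objective: simpler, and faster).

-- ===== PORT A =====
-- module-level: myDictionary = {}
def gzDict : PySem.Dict String String := PySem.Dict.empty

-- inner 'for k in range(i, j+1): result[k] = ...'
def gzTag (ks : List Int) (i : Int) (v : String) (result : List String) : List String :=
  match ks with
  | [] => result
  | k :: rest =>
      gzTag rest i v (result.set k.toNat (if k == i then "B-" ++ v else "I-" ++ v))

-- 'for j in range(i,len(words))[::-1]: ... if plat_str in myDictionary: ...; i = j; break'
-- returns some (updated result, j) on break, none if the loop falls through
def gzInner (words : List String) (result : List String) (i : Int) (js : List Int) :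
    Option (List String × Int) :=
  match js with
  | [] => none
  | j :: rest =>
      let plat := PySem.Str.lower
        (PySem.Str.join " " (PySem.List.slice words (some i) (some (j + 1))))
      match gzDict.get? plat with
      | some v => some (gzTag (PySem.List.pyRange i (j + 1) 1) i v result, j)
      | none => gzInner words result i rest

-- 'while i < len(words)': i strictly increases each pass, so fuel = len(words)+1 suffices
def gzWhile (words : List String) : Nat → List String → Int → List String
  | 0, result, _ => result
  | fuel + 1, result, i =>
      if i < (words.length : Int) then
        -- range(i, len(words))[::-1]  (slicing with step -1 reverses the range)
        match gzInner words result i ((PySem.List.pyRange i (words.length : Int) 1).reverse) with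
        | some (r', j) => gzWhile words fuel r' (j + 1)   -- i = j; break; i += 1
        | none => gzWhile words fuel result (i + 1)
      else result

def get_gazateer (words : List String) : List String :=
  gzWhile words (words.length + 1)
    ((PySem.List.pyRange 0 (words.length : Int) 1).map (fun _ => "NULL")) 0

-- ===== PORT B =====
def get_gazateer_alt (words : List String) : List String :=
  List.replicate words.length "NULL"

-- ===== PRECONDITION & SPEC =====
def Spec_get_gazateer (words : List String) (out : List String) : Prop := out = get_gazateer_alt words
instance (words : List String) (out : List String) : Decidable (Spec_get_gazateer words out) := by unfold Spec_get_gazateer; infer_instance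

-- ===== CLAIM (what is proved, stated in full; the proofs are below) =====
def Claim_equal_get_gazateer : Prop := ∀ (words : List String), Dom_get_gazateer words → Spec_get_gazateer words (get_gazateer words)

-- ===== LEMMAS AND PROOFS =====
theorem gzInner_eq_none (words result : List String) (i : Int) (js : List Int) :
    gzInner words result i js = none := by
  induction js with
  | nil => rfl
  | cons j rest ih => simp [gzInner, gzDict, ih]

theorem gzWhile_eq (words : List String) (fuel : Nat) (result : List String) (i : Int) :
    gzWhile words fuel result i = result := by
  induction fuel generalizing i with
  | zero => rfl
  | succ f ih => simp [gzWhile, gzInner_eq_none, ih]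

-- ===== VERDICT (by name: the statement is the Claim_ definition above) =====
theorem get_gazateer_spec : Claim_equal_get_gazateer := by
  intro words _
  unfold Spec_get_gazateer get_gazateer get_gazateer_alt
  rw [gzWhile_eq]
  simp [List.map_const', PySem.List.length_pyRange_one]
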